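-- pv_equiv track=rewrite | github.com/Anziron/baserow | plugins/access_control/backend/src/access_control/data_masking_handler.py | _get_strictest_permission
-- ===== SOURCE A (Python) =====
-- from typing import Any, Dict, List, Optional, Set
--
-- def _get_strictest_permission(permissions: List[str]) -> str:
--     """获取最严格的权限"""
--     priority = {
--         "invisible": 0,
--         "read_only": 1,
--         "editable": 2,
--     }
--
--     strictest = "editable"
--     strictest_priority = 2
--
--     for perm in permissions:
--         perm_priority = priority.get(perm, 2)
--         if perm_priority < strictest_priority:
--             strictest = perm
--             strictest_priority = perm_priority
--
--     return strictest
-- ===== SOURCE B (Python) =====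
-- def _get_strictest_permission(permissions):
--     """获取最严格的权限"""
--     if "invisible" in permissions:
--         return "invisible"
--     if "read_only" in permissions:
--         return "read_only"
--     return "editable"
-- ===== Notes on version B (the rewrite author's own statement) =====
-- stated objective: idiomatic
-- what changed: Replaced the priority-dict min-tracking accumulator loop with membership tests in strictness order (invisible, then read_only, else editable).
import Mathlib
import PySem

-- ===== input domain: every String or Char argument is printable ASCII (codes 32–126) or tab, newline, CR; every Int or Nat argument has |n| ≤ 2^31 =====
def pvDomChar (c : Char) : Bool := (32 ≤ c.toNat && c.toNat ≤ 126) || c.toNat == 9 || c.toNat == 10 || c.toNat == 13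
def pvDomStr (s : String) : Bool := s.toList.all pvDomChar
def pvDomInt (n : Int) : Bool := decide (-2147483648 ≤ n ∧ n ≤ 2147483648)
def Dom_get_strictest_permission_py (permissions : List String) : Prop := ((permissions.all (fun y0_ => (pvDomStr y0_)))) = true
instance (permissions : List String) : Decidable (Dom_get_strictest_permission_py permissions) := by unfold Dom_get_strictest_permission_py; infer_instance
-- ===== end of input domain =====

-- B replaces A's priority-dict min-tracking loop with membership tests in strictness order (idiomatic; same cost).


-- ===== PORT A =====
def get_strictest_permission_py (permissions : List String) : String :=
  let priority : PySem.Dict String Int :=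
    (((PySem.Dict.empty).insert "invisible" 0).insert "read_only" 1).insert "editable" 2
  let st := permissions.foldl
    (fun (st : String × Int) perm =>
      let perm_priority := priority.getD perm 2
      if perm_priority < st.2 then (perm, perm_priority) else st)
    ("editable", 2)
  st.1

-- ===== PORT B =====
def get_strictest_permission_py_alt (permissions : List String) : String :=
  if permissions.contains "invisible" then "invisible"
  else if permissions.contains "read_only" then "read_only"
  else "editable"

-- ===== PRECONDITION & SPEC =====
def Spec_get_strictest_permission_py (permissions : List String) (out : String) : Prop := out = get_strictest_permission_py_alt permissions
instance (permissions : List String) (out : String) : Decidable (Spec_get_strictest_permission_py permissions out) := by unfold Spec_get_strictest_permission_py; infer_instance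

-- ===== CLAIM (what is proved, stated in full; the proofs are below) =====
def Claim_equal_get_strictest_permission_py : Prop := ∀ (permissions : List String), Dom_get_strictest_permission_py permissions → Spec_get_strictest_permission_py permissions (get_strictest_permission_py permissions)

-- ===== LEMMAS AND PROOFS =====

-- ===== VERDICT (by name: the statement is the Claim_ definition above) =====
-- the loop body of port A, named for the lemmas
def pvStep (priority : PySem.Dict String Int) (st : String × Int) (perm : String) : String × Int :=
  let perm_priority := priority.getD perm 2
  if perm_priority < st.2 then (perm, perm_priority) else st

def pvPrio : PySem.Dict String Int :=
  (((PySem.Dict.empty).insert "invisible" 0).insert "read_only" 1).insert "editable" 2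

lemma pvGetD (p : String) :
    pvPrio.getD p 2 = if p = "invisible" then 0 else if p = "read_only" then 1 else 2 := by
  simp only [pvPrio, PySem.Dict.getD_insert, PySem.Dict.getD_empty]
  by_cases h1 : p = "invisible" <;> by_cases h2 : p = "read_only" <;>
    by_cases h3 : p = "editable" <;> simp_all

lemma pvStep_eq (st : String × Int) (p : String) :
    pvStep pvPrio st p =
      if (if p = "invisible" then 0 else if p = "read_only" then 1 else 2) < st.2
      then (p, if p = "invisible" then 0 else if p = "read_only" then 1 else 2) else st := by
  simp [pvStep, pvGetD]

lemma pvFold_inv0 (l : List String) :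
    l.foldl (pvStep pvPrio) ("invisible", 0) = ("invisible", 0) := by
  induction l with
  | nil => rfl
  | cons p t ih =>
      have hstep : pvStep pvPrio ("invisible", 0) p = ("invisible", 0) := by
        rw [pvStep_eq]; split_ifs <;> simp_all <;> omega
      simp [List.foldl_cons, hstep, ih]

lemma pvFold_inv1 (l : List String) :
    l.foldl (pvStep pvPrio) ("read_only", 1) =
      if l.contains "invisible" then ("invisible", 0) else ("read_only", 1) := by
  induction l with
  | nil => rfl
  | cons p t ih =>
      simp only [List.foldl_cons, List.contains_cons]
      by_cases h1 : p = "invisible"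
      · subst h1
        have hstep : pvStep pvPrio ("read_only", 1) "invisible" = ("invisible", 0) := by
          rw [pvStep_eq]; simp
        simp [hstep, pvFold_inv0]
      · have hstep : pvStep pvPrio ("read_only", 1) p = ("read_only", 1) := by
          rw [pvStep_eq]; split_ifs <;> simp_all <;> omega
        have e1 : ¬ "invisible" = p := fun e => h1 e.symm
        simp [hstep, ih, e1]

lemma pvFold_inv2 (l : List String) :
    l.foldl (pvStep pvPrio) ("editable", 2) =
      if l.contains "invisible" then ("invisible", 0)
      else if l.contains "read_only" then ("read_only", 1) else ("editable", 2) := by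
  induction l with
  | nil => rfl
  | cons p t ih =>
      simp only [List.foldl_cons, List.contains_cons]
      by_cases h1 : p = "invisible"
      · subst h1
        have hstep : pvStep pvPrio ("editable", 2) "invisible" = ("invisible", 0) := by
          rw [pvStep_eq]; simp
        simp [hstep, pvFold_inv0]
      · by_cases h2 : p = "read_only"
        · subst h2
          have hstep : pvStep pvPrio ("editable", 2) "read_only" = ("read_only", 1) := by
            rw [pvStep_eq]; simp
          have e1 : ¬ "invisible" = "read_only" := by decide
          simp [hstep, pvFold_inv1, e1]
        · have hstep : pvStep pvPrio ("editable", 2) p = ("editable", 2) := by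
            rw [pvStep_eq]; split_ifs <;> simp_all
          have e1 : ¬ "invisible" = p := fun e => h1 e.symm
          have e2 : ¬ "read_only" = p := fun e => h2 e.symm
          simp [hstep, ih, e1, e2]

-- ===== VERDICT =====
theorem get_strictest_permission_py_spec : Claim_equal_get_strictest_permission_py := by
  intro permissions _
  unfold Spec_get_strictest_permission_py get_strictest_permission_py_alt
  have ha : get_strictest_permission_py permissions =
      (permissions.foldl (pvStep pvPrio) ("editable", 2)).1 := rfl
  rw [ha, pvFold_inv2 permissions]
  by_cases c1 : "invisible" ∈ permissions <;> by_cases c2 : "read_only" ∈ permissions <;>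
    simp [c1, c2]
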